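-- pv_equiv track=rewrite | github.com/jomout/Thesis-SastLLM | src/sastllm/parsers/comment_stripper.py | _byte_index_after_n_lines
-- ===== SOURCE A (Python) =====
-- from typing import Dict, Iterable, List, Optional, Tuple
--
-- def _byte_index_after_n_lines(code: str, n_lines: int) -> Optional[int]:
--     if n_lines <= 0:
--         return None
--     idx = 0
--     count = 0
--     while count < n_lines and idx != -1:
--         idx = code.find("\n", idx)
--         if idx == -1:
--             break
--         idx += 1
--         count += 1
--     return len(code[:idx].encode("utf-8")) if count == n_lines and idx != -1 else None
-- ===== SOURCE B (Python) =====
-- from typing import Optional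
--
--
-- def _byte_index_after_n_lines(code: str, n_lines: int) -> Optional[int]:
--     if n_lines <= 0:
--         return None
--     data = code.encode("utf-8")
--     positions = [i for i, byte in enumerate(data) if byte == 0x0A]
--     if len(positions) < n_lines:
--         return None
--     return positions[n_lines - 1] + 1
-- ===== Notes on version B (the rewrite author's own statement) =====
-- stated objective: simpler
-- what changed: A advances through the string one find('\n', idx) call at a time inside a counting while-loop; B makes one pass collecting every newline byte position into a list and directly indexes the (n_lines-1)-th, turning the loop into a comprehension plus a bounds check.
import Mathlib
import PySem

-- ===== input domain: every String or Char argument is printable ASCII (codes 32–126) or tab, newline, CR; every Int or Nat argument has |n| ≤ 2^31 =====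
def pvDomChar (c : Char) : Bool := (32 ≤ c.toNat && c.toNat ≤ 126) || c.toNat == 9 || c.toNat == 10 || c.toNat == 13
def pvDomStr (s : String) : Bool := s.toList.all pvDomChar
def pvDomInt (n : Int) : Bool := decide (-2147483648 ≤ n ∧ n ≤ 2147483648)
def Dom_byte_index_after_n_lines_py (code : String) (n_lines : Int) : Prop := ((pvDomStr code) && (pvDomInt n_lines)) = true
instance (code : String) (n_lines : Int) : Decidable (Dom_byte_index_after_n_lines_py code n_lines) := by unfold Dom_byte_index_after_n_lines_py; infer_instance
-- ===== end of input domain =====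

-- B replaces A's incremental find-loop by one pass that collects all newline byte positions and indexes the (n_lines-1)-th; objective: simpler decomposition, same cost.
-- On the ASCII domain Dom_ every character is one UTF-8 byte, so len(...encode("utf-8")) is ported as character count (exact on Dom_).

-- ===== PORT A =====
-- the while loop of A: fuel = n_lines - count (count increments each kept iteration); some idx = loop ended with count == n_lines (idx ≠ -1), none = break on find == -1
def pvLoopA (cs : List Char) : Nat → Int → Option Int
  | 0, idx => some idx
  | m + 1, idx =>
      let j := PySem.Chars.findFrom cs ['\n'] idx none   -- idx = code.find("\n", idx)
      if j = -1 then none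
      else pvLoopA cs m (j + 1)                          -- idx += 1; count += 1

def byte_index_after_n_lines_py (code : String) (n_lines : Int) : Option Int :=
  if n_lines ≤ 0 then none
  else
    match pvLoopA code.toList n_lines.toNat 0 with
    | none => none                                       -- count != n_lines (break on -1)
    | some idx => some ((PySem.Chars.slice code.toList none (some idx)).length : Int)
      -- len(code[:idx].encode("utf-8")): character count of the slice (exact on Dom_'s ASCII)

-- ===== PORT B =====
def byte_index_after_n_lines_py_alt (code : String) (n_lines : Int) : Option Int :=
  if n_lines ≤ 0 then none
  else
    -- positions = [i for i, byte in enumerate(code.encode("utf-8")) if byte == 0x0A]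
    -- (on Dom_'s ASCII the UTF-8 bytes are the characters, one byte each)
    let positions : List Int :=
      ((PySem.List.enumerate code.toList 0).filter (fun p => p.2 == '\n')).map (·.1)
    if (positions.length : Int) < n_lines then none
    else some (PySem.List.pyGetD positions (n_lines - 1) 0 + 1)   -- positions[n_lines-1] + 1 (index in range after the length check)

-- ===== PRECONDITION & SPEC =====
def Spec_byte_index_after_n_lines_py (code : String) (n_lines : Int) (out : Option Int) : Prop := out = byte_index_after_n_lines_py_alt code n_lines
instance (code : String) (n_lines : Int) (out : Option Int) : Decidable (Spec_byte_index_after_n_lines_py code n_lines out) := by unfold Spec_byte_index_after_n_lines_py; infer_instance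

-- ===== CLAIM (what is proved, stated in full; the proofs are below) =====
def Claim_equal_byte_index_after_n_lines_py : Prop := ∀ (code : String) (n_lines : Int), Dom_byte_index_after_n_lines_py code n_lines → Spec_byte_index_after_n_lines_py code n_lines (byte_index_after_n_lines_py code n_lines)

-- ===== LEMMAS AND PROOFS =====

-- the list of newline positions B builds
def pvNl (cs : List Char) : List Int :=
  ((PySem.List.enumerate cs 0).filter (fun p => p.2 == '\n')).map (·.1)

theorem pv_enumerate_shift (α : Type) (xs : List α) (s : Int) :
    PySem.List.enumerate xs (s + 1) = (PySem.List.enumerate xs s).map (fun p => (p.1 + 1, p.2)) := by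
  induction xs generalizing s with
  | nil => simp [PySem.List.enumerate_nil]
  | cons x xs ih =>
    rw [PySem.List.enumerate_cons, PySem.List.enumerate_cons, List.map_cons]
    rw [add_right_comm, ih]

theorem pvNl_nil : pvNl [] = [] := rfl

theorem pvNl_cons (c : Char) (cs : List Char) :
    pvNl (c :: cs) = if c = '\n' then 0 :: (pvNl cs).map (· + 1) else (pvNl cs).map (· + 1) := by
  unfold pvNl
  rw [PySem.List.enumerate_cons, show (0:Int) + 1 = 0 + 1 from rfl, pv_enumerate_shift]
  by_cases hc : c = '\n' <;>
    simp [hc, List.filter_map, List.map_map, Function.comp_def]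

theorem pvNl_mem_iff (cs : List Char) (p : Int) :
    p ∈ pvNl cs ↔ ∃ (k : Nat) (hk : k < cs.length), cs[k] = '\n' ∧ p = (k : Int) := by
  unfold pvNl
  simp only [List.mem_map, List.mem_filter, PySem.List.mem_enumerate_iff]
  constructor
  · rintro ⟨⟨i, x⟩, ⟨⟨k, hk, hik⟩, hx⟩, hp⟩
    cases hik
    exact ⟨k, hk, by simpa using hx, by simpa using hp.symm⟩
  · rintro ⟨k, hk, hc, hp⟩
    exact ⟨((k:Int), '\n'), ⟨⟨k, hk, by simp [hc]⟩, by simp⟩, hp.symm⟩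

theorem pvNl_bounds (cs : List Char) (p : Int) (hp : p ∈ pvNl cs) :
    0 ≤ p ∧ p + 1 ≤ (cs.length : Int) := by
  obtain ⟨k, hk, -, rfl⟩ := (pvNl_mem_iff cs p).1 hp
  omega

theorem pvNl_pairwise (cs : List Char) : (pvNl cs).Pairwise (· < ·) := by
  unfold pvNl
  exact ((PySem.List.pairwise_lt_enumerate cs 0).filter _).map _ (fun _ _ h => h)

theorem pv_mem_iff_nl_ne_nil (cs : List Char) : '\n' ∈ cs ↔ pvNl cs ≠ [] := by
  rw [List.mem_iff_getElem, ← List.isEmpty_eq_false_iff, List.isEmpty_eq_false_iff_exists_mem]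
  constructor
  · rintro ⟨k, hk, hc⟩
    exact ⟨(k:Int), (pvNl_mem_iff cs _).2 ⟨k, hk, hc, rfl⟩⟩
  · rintro ⟨p, hp⟩
    obtain ⟨k, hk, hc, -⟩ := (pvNl_mem_iff cs p).1 hp
    exact ⟨k, hk, hc⟩

theorem pv_prefix_singleton (l : List Char) : ['\n'] <+: l ↔ l.head? = some '\n' := by
  cases l with
  | nil => simp
  | cons a t => simp [List.cons_prefix_cons, eq_comm]

theorem pv_find_eq (cs : List Char) :
    PySem.Chars.find cs ['\n'] = ((pvNl cs).head?).getD (-1) := by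
  cases hnl : pvNl cs with
  | nil =>
    have : '\n' ∉ cs := fun h => (pv_mem_iff_nl_ne_nil cs).1 h hnl
    rw [(PySem.Chars.find_eq_neg_one_iff cs ['\n']).2 (fun hinf => this ((List.singleton_infix_iff '\n' cs).1 hinf))]
    rfl
  | cons p t =>
    have hpm : p ∈ pvNl cs := by rw [hnl]; exact List.mem_cons_self
    obtain ⟨k, hk, hck, rfl⟩ := (pvNl_mem_iff cs p).1 hpm
    have hmem : '\n' ∈ cs := by rw [List.mem_iff_getElem]; exact ⟨k, hk, hck⟩
    have hnn : 0 ≤ PySem.Chars.find cs ['\n'] := by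
      rw [PySem.Chars.find_nonneg_iff cs ['\n']]
      exact (List.singleton_infix_iff '\n' cs).2 hmem
    obtain ⟨hpre, hmin⟩ := PySem.Chars.find_spec hnn
    set q := (PySem.Chars.find cs ['\n']).toNat with hq
    have hql : q < cs.length := by
      rcases hpre with ⟨r, hr⟩
      have := congrArg List.length hr
      simp [List.length_drop] at this
      omega
    have hcq : cs[q] = '\n' := by
      have h2 := (pv_prefix_singleton (cs.drop q)).1 hpre
      rw [List.head?_drop, List.getElem?_eq_getElem hql] at h2
      simpa using h2
    -- q is in pvNl, so k ≤ q (k is the head, pvNl pairwise <)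
    have hqm : (q : Int) ∈ pvNl cs := (pvNl_mem_iff cs _).2 ⟨q, hql, hcq, rfl⟩
    have hkq : k ≤ q := by
      rw [hnl] at hqm
      rcases List.mem_cons.1 hqm with h | h
      · omega
      · have hpw := pvNl_pairwise cs
        rw [hnl] at hpw
        have := (List.pairwise_cons.1 hpw).1 _ h
        omega
    have hqk : ¬ (k < q) := by
      intro hlt
      exact hmin k (by omega) ((pv_prefix_singleton (cs.drop k)).2 (by rw [List.head?_drop, List.getElem?_eq_getElem hk]; simp [hck]))
    have hqek : q = k := by omega
    simp only [List.head?_cons, Option.getD_some]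
    omega

theorem pvNl_drop (cs : List Char) (p : Int) (t : List Int) (h : pvNl cs = p :: t) :
    t = (pvNl (cs.drop (p.toNat + 1))).map (· + (p + 1)) := by
  induction cs generalizing p t with
  | nil => simp [pvNl_nil] at h
  | cons c cs ih =>
    rw [pvNl_cons] at h
    by_cases hc : c = '\n'
    · rw [if_pos hc] at h
      obtain ⟨rfl, rfl⟩ : p = 0 ∧ t = (pvNl cs).map (· + 1) := by
        constructor <;> [exact (List.cons_eq_cons.1 h).1.symm; exact (List.cons_eq_cons.1 h).2.symm]
      simp
    · rw [if_neg hc] at h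
      cases hnl : pvNl cs with
      | nil => rw [hnl] at h; simp at h
      | cons p' t' =>
        rw [hnl, List.map_cons] at h
        obtain ⟨hp, ht⟩ := List.cons_eq_cons.1 h
        have hp'0 : 0 ≤ p' := (pvNl_bounds cs p' (by rw [hnl]; exact List.mem_cons_self)).1
        have := ih p' t' hnl
        subst hp ht
        rw [this, List.map_map]
        have hstep : (p' + 1).toNat + 1 = p'.toNat + 1 + 1 := by omega
        rw [List.drop_succ_cons, show ((p'+1).toNat) = p'.toNat + 1 by omega]
        apply List.map_congr_left
        intro x hx
        simp [Function.comp]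
        ring

theorem pvLoopA_shift (cs : List Char) (m : Nat) (k : Nat) (hk : k ≤ cs.length) :
    pvLoopA cs m (k : Int) = (pvLoopA (cs.drop k) m 0).map (· + (k : Int)) := by
  induction m generalizing cs k with
  | zero => simp [pvLoopA]
  | succ m ih =>
    rw [pvLoopA, pvLoopA]
    rw [PySem.Chars.findFrom_natCast cs ['\n'] k hk]
    simp only [PySem.Chars.findFrom_zero]
    set f := PySem.Chars.find (cs.drop k) ['\n'] with hf
    by_cases hneg : f = -1
    · simp [hneg]
    · have hf0 : 0 ≤ f := by
        have := PySem.Chars.neg_one_le_find (cs.drop k) ['\n']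
        rw [← hf] at this
        omega
      rw [if_neg hneg, if_neg (by omega : ¬ (k + f = -1)), if_neg hneg]
      -- f points at a '\n' in cs.drop k, so f < (cs.drop k).length
      obtain ⟨hpre, -⟩ := PySem.Chars.find_spec (s := cs.drop k) (sub := ['\n']) hf0
      have hflen : f.toNat < (cs.drop k).length := by
        rcases hpre with ⟨r, hr⟩
        have := congrArg List.length hr
        simp [List.length_drop] at this ⊢
        omega
      have hkf : (k + f + 1) = ((k + f.toNat + 1 : Nat) : Int) := by push_cast; omega
      have hdd : cs.drop (k + f.toNat + 1) = (cs.drop k).drop (f.toNat + 1) := by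
        rw [List.drop_drop]; ring_nf
      rw [show (↑k + f + 1 : Int) = ↑k + f + 1 from rfl]
      have hf1 : f + 1 = ((f.toNat + 1 : Nat) : Int) := by omega
      have hdl : f.toNat + 1 ≤ (cs.drop k).length := by omega
      have hL : pvLoopA cs m (↑k + f + 1) = (pvLoopA (cs.drop (k + f.toNat + 1)) m 0).map (· + ((k + f.toNat + 1 : Nat) : Int)) := by
        rw [hkf]; exact ih cs (k + f.toNat + 1) (by simp [List.length_drop] at hflen; omega)
      have hR : pvLoopA (cs.drop k) m (f + 1) = (pvLoopA ((cs.drop k).drop (f.toNat + 1)) m 0).map (· + ((f.toNat + 1 : Nat) : Int)) := by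
        rw [hf1]; exact ih (cs.drop k) (f.toNat + 1) hdl
      rw [hL, hR, hdd, Option.map_map]
      cases pvLoopA (((cs.drop k).drop (f.toNat + 1))) m 0 with
      | none => simp
      | some x => simp; ring

theorem pvLoopA_eq (m : Nat) (cs : List Char) :
    pvLoopA cs (m + 1) 0 = ((pvNl cs)[m]?).map (· + 1) := by
  induction m generalizing cs with
  | zero =>
    rw [pvLoopA]
    simp only [PySem.Chars.findFrom_zero, pv_find_eq]
    cases hnl : pvNl cs with
    | nil => simp
    | cons p t =>
      have hp0 : 0 ≤ p := (pvNl_bounds cs p (by rw [hnl]; exact List.mem_cons_self)).1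
      simp only [List.head?_cons, Option.getD_some]
      rw [if_neg (by omega), pvLoopA]
      simp
  | succ m ih =>
    rw [pvLoopA]
    simp only [PySem.Chars.findFrom_zero, pv_find_eq]
    cases hnl : pvNl cs with
    | nil => simp
    | cons p t =>
      obtain ⟨hp0, hp1⟩ := pvNl_bounds cs p (by rw [hnl]; exact List.mem_cons_self)
      simp only [List.head?_cons, Option.getD_some]
      rw [if_neg (by omega)]
      have hcast : p + 1 = ((p.toNat + 1 : Nat) : Int) := by omega
      rw [hcast, pvLoopA_shift cs (m + 1) (p.toNat + 1) (by omega), ih]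
      rw [pvNl_drop cs p t hnl]
      simp only [List.getElem?_cons_succ, List.getElem?_map]
      cases (pvNl (cs.drop (p.toNat + 1)))[m]? with
      | none => simp
      | some x => simp; omega

-- ===== VERDICT (by name: the statement is the Claim_ definition above) =====
theorem byte_index_after_n_lines_py_spec : Claim_equal_byte_index_after_n_lines_py := by
  intro code n_lines _
  unfold Spec_byte_index_after_n_lines_py byte_index_after_n_lines_py byte_index_after_n_lines_py_alt
  by_cases hn : n_lines ≤ 0
  · simp [hn]
  · rw [if_neg hn, if_neg hn]
    set cs := code.toList
    have hpos : pvNl cs = ((PySem.List.enumerate cs 0).filter (fun p => p.2 == '\n')).map (·.1) := rfl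
    rw [← hpos]
    have hn1 : 1 ≤ n_lines.toNat := by omega
    obtain ⟨m, hm⟩ : ∃ m, n_lines.toNat = m + 1 := ⟨n_lines.toNat - 1, by omega⟩
    rw [hm, pvLoopA_eq m cs]
    by_cases hlen : ((pvNl cs).length : Int) < n_lines
    · have : (pvNl cs)[m]? = none := by
        rw [List.getElem?_eq_none_iff]
        omega
      rw [this, if_pos hlen]
      rfl
    · have hmlt : m < (pvNl cs).length := by omega
      rw [List.getElem?_eq_getElem hmlt, if_neg hlen]
      simp only [Option.map_some]
      obtain ⟨h0, h1⟩ := pvNl_bounds cs ((pvNl cs)[m]) (List.getElem_mem hmlt)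
      have hgd : PySem.List.pyGetD (pvNl cs) (n_lines - 1) 0 = (pvNl cs)[m] := by
        have : n_lines - 1 = ((m : Nat) : Int) := by omega
        rw [this, PySem.List.pyGetD_natCast]
        simp [List.getD, List.getElem?_eq_getElem hmlt]
      rw [hgd]
      -- slice length: code[:idx] with 0 ≤ idx ≤ len
      have hsl : PySem.Chars.slice cs none (some ((pvNl cs)[m] + 1)) = cs.take ((pvNl cs)[m] + 1).toNat := by
        simp only [PySem.Chars.slice_eq_listSlice]
        exact PySem.List.slice_to cs (by omega)
      rw [hsl]
      simp only [List.length_take]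
      congr 1
      omega
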